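-- pv_equiv track=rewrite | github.com/GiliardGodoi/algorithms | python/GA/GILIARD_atividades/03exercicio.py | __by_ranking
-- ===== SOURCE A (Python) =====
-- def __by_ranking(population):
--     K = 2 * len(population) # K = sum(map(lambda i: i['fitness'],population),0)
--     delta = 2 # delta = int(K/len(population))
--     population = sorted(population,key=lambda item : item['fitness'],reverse=False)
--     population[0]['fitness'] = K
--     for i in range(1,len(population)):
--         population[i]['fitness'] = (population[(i-1)]['fitness'] - delta)
--
--     return population
-- ===== SOURCE B (Python) =====
-- def __by_ranking(population):
--     # Rank-based reassignment: sort ascending by fitness, then give the item at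
--     # sorted position i the fitness 2*(n - i) directly (no recurrence on the
--     # previously written neighbour, no in-place mutation of the input dicts).
--     n = len(population)
--     ranked = sorted(population, key=lambda item: item['fitness'])
--     return [{**item, 'fitness': 2 * (n - i)} for i, item in enumerate(ranked)]
-- ===== Notes on version B (the rewrite author's own statement) =====
-- stated objective: simpler
-- what changed: B replaces A's sequential recurrence (write population[0], then each fitness = previous element's freshly written fitness minus 2) by a direct closed-form assignment from the sorted rank (fitness = 2*(n-i)), built as a non-mutating comprehension over enumerate.
import Mathlib
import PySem

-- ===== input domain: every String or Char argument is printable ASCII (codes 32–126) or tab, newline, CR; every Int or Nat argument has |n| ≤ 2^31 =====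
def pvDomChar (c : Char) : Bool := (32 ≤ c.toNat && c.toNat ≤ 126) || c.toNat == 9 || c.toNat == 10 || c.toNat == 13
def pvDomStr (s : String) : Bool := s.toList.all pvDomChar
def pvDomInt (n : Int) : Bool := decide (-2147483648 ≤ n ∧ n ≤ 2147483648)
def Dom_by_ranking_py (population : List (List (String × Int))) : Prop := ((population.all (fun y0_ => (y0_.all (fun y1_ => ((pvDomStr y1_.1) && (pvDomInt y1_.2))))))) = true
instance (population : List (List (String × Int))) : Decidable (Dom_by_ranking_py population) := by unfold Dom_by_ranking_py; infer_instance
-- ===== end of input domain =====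

-- B assigns each sorted item its fitness 2*(n-i) directly from its rank instead of A's
-- recurrence on the previously written neighbour; return-value equivalence only: A mutates
-- the input dicts in place, B builds new dicts.

-- item['fitness'] (read; Pre_ guarantees the key is present where Python would raise KeyError)
def pvFit (d : List (String × Int)) : Int := (PySem.Dict.mk d).getD "fitness" 0
-- d['fitness'] = v (overwrite keeps position, new key appends — exact Python dict semantics)
def pvSetFit (d : List (String × Int)) (v : Int) : List (String × Int) :=
  ((PySem.Dict.mk d).insert "fitness" v).items

-- ===== PORT A =====
def by_ranking_py (population : List (List (String × Int))) : List (List (String × Int)) :=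
  let K : Int := 2 * population.length
  let delta : Int := 2
  let pop := PySem.List.sorted population (fun item => pvFit item)
  match pop with
  | [] => []  -- unreachable under Pre_ (Python raises IndexError at population[0])
  | d0 :: rest =>
    -- population[0]['fitness'] = K, then the loop for i in range(1, len(population));
    -- indices i, i-1 are in range, so list access is List.getD/set at i.toNat
    (PySem.List.pyRange 1 (d0 :: rest).length 1).foldl
      (fun lst i =>
        lst.set i.toNat (pvSetFit (lst.getD i.toNat []) (pvFit (lst.getD (i - 1).toNat []) - delta)))
      (pvSetFit d0 K :: rest)

-- ===== PORT B =====
def by_ranking_py_alt (population : List (List (String × Int))) : List (List (String × Int)) :=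
  let n : Int := population.length
  let ranked := PySem.List.sorted population (fun item => pvFit item)
  (PySem.List.enumerate ranked).map (fun p => pvSetFit p.2 (2 * (n - p.1)))

-- ===== PRECONDITION & SPEC =====
-- Pre_: exactly where Python A returns — a nonempty population (else IndexError) whose
-- members all carry the 'fitness' key (else KeyError in the sort key).
def Pre_by_ranking_py (population : List (List (String × Int))) : Prop :=
  population ≠ [] ∧ ∀ d ∈ population, (PySem.Dict.mk d).contains "fitness" = true

instance (population : List (List (String × Int))) : Decidable (Pre_by_ranking_py population) := by
  unfold Pre_by_ranking_py; infer_instance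

def pvWitness_by_ranking_py : (List (List (String × Int))) :=
  [[("fitness", 3), ("x", 1)], [("fitness", 1)]]

def Spec_by_ranking_py (population : List (List (String × Int))) (out : List (List (String × Int))) : Prop := out = by_ranking_py_alt population
instance (population : List (List (String × Int))) (out : List (List (String × Int))) : Decidable (Spec_by_ranking_py population out) := by unfold Spec_by_ranking_py; infer_instance

-- ===== CLAIM (what is proved, stated in full; the proofs are below) =====
def Claim_equal_by_ranking_py : Prop := ∀ (population : List (List (String × Int))), Dom_by_ranking_py population → Pre_by_ranking_py population → Spec_by_ranking_py population (by_ranking_py population)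

-- ===== LEMMAS AND PROOFS =====

-- reading back the fitness just written
theorem pvMk_items {κ ν : Type} [BEq κ] (d : PySem.Dict κ ν) : PySem.Dict.mk d.items = d := rfl

theorem pvFit_pvSetFit (d : List (String × Int)) (v : Int) : pvFit (pvSetFit d v) = v := by
  simp only [pvFit, pvSetFit, pvMk_items, PySem.Dict.getD_insert_self]

-- the loop invariant: after folding range(1, k) the first k entries carry 2*(n-i), the rest are untouched
theorem pv_loop_inv (d0 : List (String × Int)) (rest : List (List (String × Int))) :
    ∀ k : Nat, 1 ≤ k → k ≤ (d0 :: rest).length →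
      (PySem.List.pyRange 1 (k : Int) 1).foldl
        (fun lst i =>
          lst.set i.toNat (pvSetFit (lst.getD i.toNat [])
            (pvFit (lst.getD (i - 1).toNat []) - 2)))
        (pvSetFit d0 (2 * (d0 :: rest).length) :: rest)
      = (PySem.List.enumerate ((d0 :: rest).take k)).map
          (fun p => pvSetFit p.2 (2 * (((d0 :: rest).length : Int) - p.1)))
        ++ (d0 :: rest).drop k := by
  intro k hk
  induction k, hk using Nat.le_induction with
  | base =>
    intro _
    have h1 : ((1 : Nat) : Int) = 1 := by norm_num
    rw [h1, PySem.List.pyRange_one_eq_nil le_rfl]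
    simp [PySem.List.enumerate_cons, PySem.List.enumerate_nil]
  | succ k hk ih =>
    intro hlen
    have hklt : k < (d0 :: rest).length := hlen
    have ih := ih (le_of_lt hklt)
    set l := d0 :: rest with hl
    set n : Int := (l.length : Int) with hn
    set f : Int × List (String × Int) → List (String × Int) :=
      (fun p => pvSetFit p.2 (2 * (n - p.1))) with hf
    have hcast : (((k + 1 : Nat)) : Int) = (k : Int) + 1 := by push_cast; ring
    rw [hcast, PySem.List.pyRange_one_succ_right (by exact_mod_cast hk), List.foldl_append, ih]
    set E := (PySem.List.enumerate (l.take k)).map f with hE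
    have hElen : E.length = k := by
      simp [hE, PySem.List.length_enumerate, Nat.le_of_lt hklt]
    have htn : ((k : Int)).toNat = k := Int.toNat_natCast k
    have htn1 : ((k : Int) - 1).toNat = k - 1 := by omega
    have hdrop : l.drop k = l[k] :: l.drop (k + 1) := List.drop_eq_getElem_cons hklt
    -- the element being written
    have hget_k : (E ++ l.drop k).getD k [] = l[k] := by
      have h0 : (E ++ l.drop k).getD k [] = (l.drop k).getD 0 [] := by
        simpa [hElen] using List.getD_append_right E (l.drop k) [] k (by omega)
      rw [h0, hdrop]; rfl
    -- the previously written element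
    have hkm1 : k - 1 < E.length := by omega
    have hget_prev : (E ++ l.drop k).getD (k - 1) [] =
        pvSetFit (l[k - 1]'(by omega)) (2 * (n - (0 + ((k - 1 : Nat) : Int)))) := by
      rw [List.getD_append _ _ _ _ hkm1, List.getD_eq_getElem _ _ hkm1]
      simp only [hE, List.getElem_map, PySem.List.getElem_enumerate, hf]
      congr 1
      exact List.getElem_take
    have hval : pvFit ((E ++ l.drop k).getD (k - 1) []) - 2 = 2 * (n - ((k : Int) + 1 - 1)) := by
      rw [hget_prev, pvFit_pvSetFit]
      have : ((k - 1 : Nat) : Int) = (k : Int) - 1 := by omega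
      rw [this]; ring
    -- perform the write
    simp only [List.foldl_cons, List.foldl_nil]
    rw [htn, htn1, hget_k, hval]
    have hsets : ∀ v, (E ++ l.drop k).set k v = E ++ v :: l.drop (k + 1) := by
      intro v
      rw [hdrop]
      have hmid : (E ++ l[k] :: l.drop (k + 1)).set E.length v = E ++ v :: l.drop (k + 1) := by
        rw [List.set_append_right _ _ le_rfl]
        simp only [Nat.sub_self, List.set_cons_zero]
      rw [hElen] at hmid
      exact hmid
    rw [hsets]
    -- the right-hand side for k+1
    have htake : l.take (k + 1) = l.take k ++ [l[k]] := by
      rw [List.take_add_one, List.getElem?_eq_getElem hklt]; rfl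
    rw [htake, PySem.List.enumerate_append, List.map_append]
    simp only [PySem.List.enumerate_cons, PySem.List.enumerate_nil, List.map_cons, List.map_nil,
      List.length_take, Nat.min_eq_left (Nat.le_of_lt hklt), hf]
    rw [List.append_assoc]
    congr 2
    norm_num

-- ===== VERDICT (by name: the statement is the Claim_ definition above) =====
theorem by_ranking_py_spec : Claim_equal_by_ranking_py := by
  intro population _ hpre
  unfold Spec_by_ranking_py by_ranking_py by_ranking_py_alt
  cases hpop : PySem.List.sorted population (fun item => pvFit item) with
  | nil =>
    exact absurd ((PySem.List.sorted_eq_nil_iff _ _ _).mp hpop) hpre.1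
  | cons d0 rest =>
    have hlen : population.length = (d0 :: rest).length := by
      rw [← hpop, PySem.List.length_sorted]
    have hinv := pv_loop_inv d0 rest (d0 :: rest).length (by simp) le_rfl
    rw [List.take_length, List.drop_length, List.append_nil] at hinv
    rw [hlen]
    exact hinv
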